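-- pv_equiv track=rewrite | github.com/digisilk/janus_ui | utils/string_presence_utils.py | sample_apks
-- ===== SOURCE A (Python) =====
-- from collections import defaultdict
--
-- def sample_apks(apks, samples_per_year):
--     apks_by_year = defaultdict(list)
--     for apk in apks:
--         year = apk[2][:4]  # Assuming vt_scan_date is in the format YYYY-MM-DD
--         apks_by_year[year].append(apk)
--
--     sampled_apks = []
--     for year, year_apks in apks_by_year.items():
--         sample_size = min(samples_per_year, len(year_apks))
--         step = max(1, len(year_apks) // sample_size)
--         sampled_apks.extend(year_apks[::step][:sample_size])
--
--     return sorted(sampled_apks, key=lambda x: x[2])  # Sort by vt_scan_date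
-- ===== SOURCE B (Python) =====
-- def sample_apks(apks, samples_per_year):
--     # simpler: distinct years in first-appearance order + a filter per year; no defaultdict
--     sampled = []
--     for year in dict.fromkeys(apk[2][:4] for apk in apks):
--         group = [apk for apk in apks if apk[2][:4] == year]
--         size = min(samples_per_year, len(group))
--         step = max(1, len(group) // size)
--         sampled += group[::step][:size]
--     return sorted(sampled, key=lambda x: x[2])
-- ===== Notes on version B (the rewrite author's own statement) =====
-- stated objective: simpler
-- what changed: Replaces defaultdict bucketing plus dict-items iteration with a dedup of the year keys and a per-year filter pass, keeping the stride-sampling arithmetic identical.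
import Mathlib
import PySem

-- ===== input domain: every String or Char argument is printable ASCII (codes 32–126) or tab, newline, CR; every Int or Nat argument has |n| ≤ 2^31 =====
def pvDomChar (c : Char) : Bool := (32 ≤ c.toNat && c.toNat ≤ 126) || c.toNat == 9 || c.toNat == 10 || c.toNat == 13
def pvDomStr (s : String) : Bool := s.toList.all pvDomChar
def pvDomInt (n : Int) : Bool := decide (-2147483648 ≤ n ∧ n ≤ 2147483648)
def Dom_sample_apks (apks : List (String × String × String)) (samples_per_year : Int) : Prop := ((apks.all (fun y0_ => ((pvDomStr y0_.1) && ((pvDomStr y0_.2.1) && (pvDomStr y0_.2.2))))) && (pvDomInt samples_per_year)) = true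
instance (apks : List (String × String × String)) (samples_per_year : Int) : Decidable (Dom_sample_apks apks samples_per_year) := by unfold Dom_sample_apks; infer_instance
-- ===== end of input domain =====

-- B groups by dedup-ed year keys + a filter per year instead of A's defaultdict bucketing (objective: simpler; same sampling arithmetic).

-- ===== PORT A =====
def sample_apks (apks : List (String × String × String)) (samples_per_year : Int) : List (String × String × String) :=
  -- apks_by_year = defaultdict(list); for apk in apks: apks_by_year[apk[2][:4]].append(apk)
  let apks_by_year :=
    (apks.map (fun apk => (PySem.Str.slice apk.2.2 none (some 4), apk))).foldl
      (fun d p => d.modify p.1 [] (· ++ [p.2])) PySem.Dict.empty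
  -- for year, year_apks in apks_by_year.items(): sampled_apks.extend(year_apks[::step][:sample_size])
  let sampled_apks := apks_by_year.items.foldl
    (fun acc p =>
      let year_apks := p.2
      let sample_size := min samples_per_year (year_apks.length : Int)
      let step := max 1 (PySem.Int.floordiv (year_apks.length : Int) sample_size)
      acc ++ PySem.List.slice ((PySem.List.slice? year_apks none none step).getD []) none (some sample_size)) []
  PySem.List.sorted sampled_apks (fun x => x.2.2) false

-- ===== PORT B =====
-- group[::step][:size] with size = min(samples_per_year, len(group)), step = max(1, len(group)//size)
def pyStrideSample (samples_per_year : Int) (group : List (String × String × String)) : List (String × String × String) :=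
  let size := min samples_per_year (group.length : Int)
  let step := max 1 (PySem.Int.floordiv (group.length : Int) size)
  PySem.List.slice ((PySem.List.slice? group none none step).getD []) none (some size)

def sample_apks_alt (apks : List (String × String × String)) (samples_per_year : Int) : List (String × String × String) :=
  -- for year in dict.fromkeys(apk[2][:4] for apk in apks): sampled += pyStrideSample(spy, [apk for apk in apks if apk[2][:4] == year])
  let years := PySem.List.dedup (apks.map (fun apk => PySem.Str.slice apk.2.2 none (some 4)))
  let sampled := years.foldl
    (fun acc year =>
      acc ++ pyStrideSample samples_per_year
        (apks.filter (fun apk => PySem.Str.slice apk.2.2 none (some 4) == year))) []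
  PySem.List.sorted sampled (fun x => x.2.2) false

-- ===== PRECONDITION & SPEC =====
-- Pre_ excludes exactly the inputs where Python A raises ZeroDivisionError (samples_per_year == 0 with a
-- nonempty apks list); B raises the same error there.
def Pre_sample_apks (apks : List (String × String × String)) (samples_per_year : Int) : Prop :=
  samples_per_year ≠ 0 ∨ apks = []
instance (apks : List (String × String × String)) (samples_per_year : Int) : Decidable (Pre_sample_apks apks samples_per_year) := by unfold Pre_sample_apks; infer_instance
def pvWitness_sample_apks : (List (String × String × String)) × Int :=
  ([("p1", "h1", "2020-01-02"), ("p2", "h2", "2021-03-04"), ("p3", "h3", "2020-05-06")], 1)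

def Spec_sample_apks (apks : List (String × String × String)) (samples_per_year : Int) (out : List (String × String × String)) : Prop := out = sample_apks_alt apks samples_per_year
instance (apks : List (String × String × String)) (samples_per_year : Int) (out : List (String × String × String)) : Decidable (Spec_sample_apks apks samples_per_year out) := by unfold Spec_sample_apks; infer_instance

-- ===== CLAIM (what is proved, stated in full; the proofs are below) =====
def Claim_equal_sample_apks : Prop := ∀ (apks : List (String × String × String)) (samples_per_year : Int), Dom_sample_apks apks samples_per_year → Pre_sample_apks apks samples_per_year → Spec_sample_apks apks samples_per_year (sample_apks apks samples_per_year)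

-- ===== LEMMAS AND PROOFS =====

-- the defaultdict(list) loop of A yields, as items, the dedup-ed year keys paired with the filter of apks by that year
theorem items_group (apks : List (String × String × String)) :
    ((apks.map (fun apk => (PySem.Str.slice apk.2.2 none (some 4), apk))).foldl
      (fun d p => d.modify p.1 [] (· ++ [p.2])) PySem.Dict.empty).items
     = (PySem.List.dedup (apks.map (fun apk => PySem.Str.slice apk.2.2 none (some 4)))).map
      (fun y => (y, apks.filter (fun apk => PySem.Str.slice apk.2.2 none (some 4) == y))) := by
  set d := (apks.map (fun apk => (PySem.Str.slice apk.2.2 none (some 4), apk))).foldl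
      (fun d p => d.modify p.1 [] (· ++ [p.2])) PySem.Dict.empty with hd
  have hnd : d.keys.Nodup :=
    PySem.Dict.nodup_keys_foldl_modify_key
      (l := apks.map (fun apk => (PySem.Str.slice apk.2.2 none (some 4), apk)))
      (key := fun p => p.1) (d0 := ([] : List (String × String × String)))
      (f := fun _ p => (· ++ [p.2])) (d := PySem.Dict.empty) (by simp)
  have hkeys : d.keys = PySem.List.dedup (apks.map (fun apk => PySem.Str.slice apk.2.2 none (some 4))) := by
    have h := PySem.Dict.keys_foldl_modify_key
      (l := apks.map (fun apk => (PySem.Str.slice apk.2.2 none (some 4), apk)))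
      (key := fun p => p.1) (d0 := ([] : List (String × String × String)))
      (f := fun _ p => (· ++ [p.2])) (d := PySem.Dict.empty)
    simp only [PySem.Dict.keys_empty] at h
    rw [hd, h]
    simp [List.map_map, PySem.Set.update_nil_left, Function.comp_def]
  have hget : ∀ y, d.getD y []
      = apks.filter (fun apk => PySem.Str.slice apk.2.2 none (some 4) == y) := by
    intro y
    have h := PySem.Dict.getD_foldl_modify_append
      (l := apks.map (fun apk => (PySem.Str.slice apk.2.2 none (some 4), apk)))
      (d := PySem.Dict.empty) (c := y)
    simp only [PySem.Dict.getD_empty, List.nil_append] at h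
    rw [hd, h, List.filter_map, List.map_map]
    simp [Function.comp_def]
  rw [PySem.Dict.items_eq_map_keys d hnd [], hkeys]
  exact List.map_congr_left (fun y _ => by rw [hget y])

theorem sample_apks_eq_alt (apks : List (String × String × String)) (samples_per_year : Int) :
    sample_apks apks samples_per_year = sample_apks_alt apks samples_per_year := by
  unfold sample_apks sample_apks_alt
  dsimp only
  congr 1
  rw [items_group, List.foldl_map]
  simp only [pyStrideSample]

-- ===== VERDICT (by name: the statement is the Claim_ definition above) =====
theorem sample_apks_spec : Claim_equal_sample_apks := by
  intro apks spy _ _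
  exact sample_apks_eq_alt apks spy
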